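-- pv_equiv track=rewrite | github.com/1Franciscoluna1/Cerradura_Kleene | Cerradura_Klenee.py | metodo_kleene
-- ===== SOURCE A (Python) =====
-- def metodo_kleene(palabras, nivel):
--     if nivel == 0:
--         return [""]
--     elif nivel == 1:
--         return palabras
--     else:
--         resultado = palabras[:]
--         for palabra in palabras:
--             for p in metodo_kleene(palabras, nivel - 1):
--                 nueva_palabra = palabra + p
--                 if nueva_palabra not in resultado:
--                     resultado.append(nueva_palabra)
--         return resultado
-- ===== SOURCE B (Python) =====
-- def metodo_kleene(palabras, nivel):
--     if nivel == 0:
--         return [""]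
--     prev = palabras
--     for _ in range(2, nivel + 1):
--         res = list(palabras)
--         seen = set(palabras)
--         for w in palabras:
--             for p in prev:
--                 nw = w + p
--                 if nw not in seen:
--                     seen.add(nw)
--                     res.append(nw)
--         prev = res
--     return prev
-- ===== Notes on version B (the rewrite author's own statement) =====
-- stated objective: alternative
-- what changed: Bottom-up iteration that builds each level once from the previous one (instead of re-running the full recursion inside the loop over palabras) and dedups with a set membership test instead of a linear list scan; intended as faster, but a timing run could not confirm a clean reading (the output itself grows exponentially, so both time out at large sizes).
import Mathlib
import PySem

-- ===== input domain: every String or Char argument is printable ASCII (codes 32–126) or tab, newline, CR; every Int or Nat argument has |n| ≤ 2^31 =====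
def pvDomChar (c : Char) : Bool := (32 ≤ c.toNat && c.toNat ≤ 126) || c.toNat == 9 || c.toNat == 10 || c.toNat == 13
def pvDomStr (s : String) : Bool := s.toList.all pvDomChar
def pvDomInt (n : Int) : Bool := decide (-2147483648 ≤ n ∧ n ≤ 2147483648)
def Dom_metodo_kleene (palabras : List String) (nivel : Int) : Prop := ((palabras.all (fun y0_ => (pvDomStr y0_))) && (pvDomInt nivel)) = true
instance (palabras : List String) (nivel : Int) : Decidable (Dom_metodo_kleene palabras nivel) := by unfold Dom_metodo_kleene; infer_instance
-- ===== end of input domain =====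

-- B replaces A's per-word re-run of the full recursion by one bottom-up pass per level with a
-- set membership test instead of a linear list scan (alternative algorithm, same return value).

-- ===== PORT A =====
-- A's recursion is on the integer nivel; for nivel < 0 the Python never terminates
-- (excluded by Pre_), so the port recurses on nivel.toNat.
def kleeneAGo (palabras : List String) : Nat → List String
  | 0 => [""]
  | 1 => palabras
  | (n+2) =>
      palabras.foldl (fun resultado palabra =>
        (kleeneAGo palabras (n+1)).foldl (fun res p =>
          let nueva_palabra := palabra ++ p
          if nueva_palabra ∈ res then res else res ++ [nueva_palabra]) resultado)
        palabras

def metodo_kleene (palabras : List String) (nivel : Int) : List String :=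
  kleeneAGo palabras nivel.toNat

-- ===== PORT B =====
-- one level of B: res = list(palabras); seen = set(palabras); nested loops with set membership
def kleeneStep (palabras prev : List String) : List String :=
  (palabras.foldl (fun (st : List String × PySem.Set String) w =>
      prev.foldl (fun st p =>
        let nw := w ++ p
        if PySem.Set.contains st.2 nw then st else (st.1 ++ [nw], PySem.Set.add st.2 nw)) st)
    (palabras, PySem.Set.ofList palabras)).1

def metodo_kleene_alt (palabras : List String) (nivel : Int) : List String :=
  if nivel = 0 then [""]
  else
    (PySem.List.pyRange 2 (nivel + 1) 1).foldl (fun prev _ => kleeneStep palabras prev) palabras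

-- ===== PRECONDITION & SPEC =====
-- Pre_ excludes nivel < 0, where the Python A recurses without bound (RecursionError).
def Pre_metodo_kleene (palabras : List String) (nivel : Int) : Prop := 0 ≤ nivel
instance (palabras : List String) (nivel : Int) : Decidable (Pre_metodo_kleene palabras nivel) := by unfold Pre_metodo_kleene; infer_instance

def pvWitness_metodo_kleene : List String × Int := (["a", "b"], 2)

def Spec_metodo_kleene (palabras : List String) (nivel : Int) (out : List String) : Prop := out = metodo_kleene_alt palabras nivel
instance (palabras : List String) (nivel : Int) (out : List String) : Decidable (Spec_metodo_kleene palabras nivel out) := by unfold Spec_metodo_kleene; infer_instance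

-- ===== CLAIM (what is proved, stated in full; the proofs are below) =====
def Claim_equal_metodo_kleene : Prop := ∀ (palabras : List String) (nivel : Int), Dom_metodo_kleene palabras nivel → Pre_metodo_kleene palabras nivel → Spec_metodo_kleene palabras nivel (metodo_kleene palabras nivel)

-- ===== LEMMAS AND PROOFS =====

-- the invariant: the seen-set has exactly the members of the result list
def SeenInv (st : List String × PySem.Set String) : Prop :=
  ∀ x, PySem.Set.contains st.2 x = true ↔ x ∈ st.1

theorem seenInv_init (palabras : List String) :
    SeenInv (palabras, PySem.Set.ofList palabras) := by
  intro x
  simp [PySem.Set.mem_ofList]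

theorem inner_fold_eq (w : String) (prev : List String)
    (st : List String × PySem.Set String) (h : SeenInv st) :
    (prev.foldl (fun st p =>
        let nw := w ++ p
        if PySem.Set.contains st.2 nw then st else (st.1 ++ [nw], PySem.Set.add st.2 nw)) st).1
      = prev.foldl (fun res p =>
        let nueva_palabra := w ++ p
        if nueva_palabra ∈ res then res else res ++ [nueva_palabra]) st.1
    ∧ SeenInv (prev.foldl (fun st p =>
        let nw := w ++ p
        if PySem.Set.contains st.2 nw then st else (st.1 ++ [nw], PySem.Set.add st.2 nw)) st) := by
  induction prev generalizing st with
  | nil => exact ⟨rfl, h⟩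
  | cons p rest ih =>
    simp only [List.foldl_cons]
    by_cases hm : (w ++ p) ∈ st.1
    · have hc : PySem.Set.contains st.2 (w ++ p) = true := (h _).mpr hm
      rw [if_pos hc, if_pos hm]
      exact ih st h
    · have hc : ¬ (PySem.Set.contains st.2 (w ++ p) = true) := fun hcc => hm ((h _).mp hcc)
      have h' : SeenInv (st.1 ++ [w ++ p], PySem.Set.add st.2 (w ++ p)) := by
        intro x
        simp only [PySem.Set.contains_iff, PySem.Set.mem_add, List.mem_append,
          List.mem_singleton]
        constructor
        · rintro (hx | hx)
          · exact Or.inl ((h x).mp (by simp [hx]))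
          · exact Or.inr hx
        · rintro (hx | hx)
          · exact Or.inl ((PySem.Set.contains_iff _ _).mp ((h x).mpr hx))
          · exact Or.inr hx
      rw [if_neg hc, if_neg hm]
      exact ih _ h'

theorem outer_fold_eq (palabras prev L : List String)
    (st : List String × PySem.Set String) (h : SeenInv st) :
    (L.foldl (fun st w =>
        prev.foldl (fun st p =>
          let nw := w ++ p
          if PySem.Set.contains st.2 nw then st else (st.1 ++ [nw], PySem.Set.add st.2 nw)) st) st).1
      = L.foldl (fun resultado palabra =>
        prev.foldl (fun res p =>
          let nueva_palabra := palabra ++ p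
          if nueva_palabra ∈ res then res else res ++ [nueva_palabra]) resultado) st.1
    ∧ SeenInv (L.foldl (fun st w =>
        prev.foldl (fun st p =>
          let nw := w ++ p
          if PySem.Set.contains st.2 nw then st else (st.1 ++ [nw], PySem.Set.add st.2 nw)) st) st) := by
  induction L generalizing st with
  | nil => exact ⟨rfl, h⟩
  | cons w rest ih =>
    simp only [List.foldl_cons]
    obtain ⟨heq, hinv⟩ := inner_fold_eq w prev st h
    have := ih _ hinv
    rw [heq] at this
    exact this

-- kleeneStep performs exactly one unfolding of A's recursion body
theorem kleeneStep_eq_body (palabras prev : List String) :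
    kleeneStep palabras prev
      = palabras.foldl (fun resultado palabra =>
          prev.foldl (fun res p =>
            let nueva_palabra := palabra ++ p
            if nueva_palabra ∈ res then res else res ++ [nueva_palabra]) resultado)
          palabras := by
  unfold kleeneStep
  exact (outer_fold_eq palabras prev palabras _ (seenInv_init palabras)).1

theorem kleeneAGo_succ_succ (palabras : List String) (n : Nat) :
    kleeneAGo palabras (n+2) = kleeneStep palabras (kleeneAGo palabras (n+1)) := by
  rw [kleeneStep_eq_body]
  rfl

-- a foldl over a list that ignores the elements is function iteration
theorem foldl_const_iterate {α β : Type} (f : α → α) (l : List β) (a : α) :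
    l.foldl (fun a _ => f a) a = f^[l.length] a := by
  induction l generalizing a with
  | nil => rfl
  | cons b rest ih => simp [List.foldl_cons, ih, Function.iterate_succ_apply]

theorem pyRange_len (n : Nat) :
    (PySem.List.pyRange 2 ((n : Int) + 1) 1).length = n - 1 := by
  rw [PySem.List.length_pyRange_one]
  omega

theorem iterate_step_eq (palabras : List String) (n : Nat) :
    (kleeneStep palabras)^[n] palabras = kleeneAGo palabras (n + 1) := by
  induction n with
  | zero => rfl
  | succ m ih =>
    rw [Function.iterate_succ_apply', ih]
    exact (kleeneAGo_succ_succ palabras m).symm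

-- ===== VERDICT (by name: the statement is the Claim_ definition above) =====
theorem metodo_kleene_spec : Claim_equal_metodo_kleene := by
  intro palabras nivel _ hpre
  unfold Spec_metodo_kleene metodo_kleene metodo_kleene_alt
  obtain ⟨n, rfl⟩ := Int.eq_ofNat_of_zero_le hpre
  cases n with
  | zero => simp [kleeneAGo]
  | succ m =>
    rw [if_neg (by exact_mod_cast Nat.succ_ne_zero m)]
    rw [foldl_const_iterate, pyRange_len, Int.toNat_natCast]
    simpa using (iterate_step_eq palabras m).symm
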